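-- pv_equiv track=rewrite | github.com/carxu-13/nlp-final-project | cryptarithm_utils.py | mapping_satisfies_equation
-- ===== SOURCE A (Python) =====
-- def letters_in_equation(equation: str) -> set[str]:
--     return {char for char in equation if char.isalpha() and char.isupper()}
--
-- def mapping_has_unique_digits(mapping: dict[str, int]) -> bool:
--     return len(mapping.values()) == len(set(mapping.values()))
--
-- def parse_equation(equation: str) -> tuple[list[str], str]:
--     """Parse equations of the form WORD + WORD = RESULT."""
--     left, right = equation.split("=")
--     addends = [token.strip() for token in left.split("+") if token.strip()]
--     result = right.strip()
--     return addends, result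
--
-- def word_to_number(word: str, mapping: dict[str, int]) -> int:
--     return int("".join(str(mapping[char]) for char in word))
--
-- def mapping_satisfies_equation(equation: str, mapping: dict[str, int]) -> bool:
--     """Check that a mapping is complete, valid, and solves the puzzle."""
--     expected_letters = letters_in_equation(equation)
--     if set(mapping) != expected_letters:
--         return False
--     if not mapping_has_unique_digits(mapping):
--         return False
--
--     addends, result = parse_equation(equation)
--     for word in [*addends, result]:
--         if mapping[word[0]] == 0:
--             return False
--
--     addend_values = [word_to_number(word, mapping) for word in addends]
--     result_value = word_to_number(result, mapping)
--     return sum(addend_values) == result_value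
-- ===== SOURCE B (Python) =====
-- def mapping_satisfies_equation(equation: str, mapping: dict[str, int]) -> bool:
--     """Column-by-column (carry) check instead of building each word's integer."""
--     letters = {c for c in equation if c.isalpha() and c.isupper()}
--     if set(mapping) != letters:
--         return False
--     if len(mapping.values()) != len(set(mapping.values())):
--         return False
--     left, right = equation.split("=")
--     addends = [t.strip() for t in left.split("+") if t.strip()]
--     result = right.strip()
--     words = addends + [result]
--     if any(mapping[w[0]] == 0 for w in words):
--         return False
--     carry = 0
--     for i in range(1, max(len(w) for w in words) + 1):
--         total = carry + sum(mapping[w[-i]] for w in addends if i <= len(w))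
--         digit = mapping[result[-i]] if i <= len(result) else 0
--         if total % 10 != digit:
--             return False
--         carry = total // 10
--     return carry == 0
-- ===== Notes on version B (the rewrite author's own statement) =====
-- stated objective: alternative
-- what changed: The final numeric check no longer builds each word's integer via digit-string concatenation and int(): B verifies the addition column by column from the rightmost digit with a running carry, requiring each column's total mod 10 to match the result's digit and a zero final carry.
-- outside the precondition, e.g. on mapping_satisfies_equation('AA=B', {'A': 1, 'B': 11}): A returns True, B returns False; on mapping_satisfies_equation('AB=C', {'A': -1, 'B': 2, 'C': -12}): A returns True, B returns False; on mapping_satisfies_equation('A?+B=C', {'A': 0, 'B': 1, 'C': 2}): A returns False, B returns False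
import Mathlib
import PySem

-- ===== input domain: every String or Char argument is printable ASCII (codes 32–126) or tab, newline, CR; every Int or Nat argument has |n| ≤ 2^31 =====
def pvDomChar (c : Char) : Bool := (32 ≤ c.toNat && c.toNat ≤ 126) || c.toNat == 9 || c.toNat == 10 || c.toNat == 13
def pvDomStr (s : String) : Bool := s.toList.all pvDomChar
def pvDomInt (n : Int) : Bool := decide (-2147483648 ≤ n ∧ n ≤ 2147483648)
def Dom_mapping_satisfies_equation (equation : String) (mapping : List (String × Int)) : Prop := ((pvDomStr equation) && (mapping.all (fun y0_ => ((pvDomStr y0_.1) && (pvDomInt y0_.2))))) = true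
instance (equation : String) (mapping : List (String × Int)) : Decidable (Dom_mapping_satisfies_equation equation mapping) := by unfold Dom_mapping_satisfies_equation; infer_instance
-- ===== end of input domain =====

-- B replaces A's digit-string concatenation + int() sum comparison by a column-by-column
-- addition check with carry (alternative algorithm, same complexity).


-- ===== PORT A =====
-- shared helpers: the validation half is the same Python code in A and in B
def pvStr1 (c : Char) : String := String.ofList [c]

-- letters_in_equation: {char for char in equation if char.isalpha() and char.isupper()}
def eqLetters (equation : List Char) : PySem.Set String :=
  PySem.Set.ofList ((equation.filter
    (fun c => PySem.Chars.isalpha c && PySem.Chars.isupper c)).map (fun c => pvStr1 c))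

def eqDict (mapping : List (String × Int)) : PySem.Dict String Int := PySem.Dict.ofList mapping

-- [token.strip() for token in left.split("+") if token.strip()]
def eqAddends (left : List Char) : List (List Char) :=
  ((PySem.Chars.splitOn left ['+']).map PySem.Chars.strip).filter (fun t => !t.isEmpty)

-- 'left, right = equation.split("=")': some (left, right), or none for the ValueError
-- (anything but exactly one '='), which Pre_ excludes
def eqParts (cs : List Char) : Option (List Char × List Char) :=
  match PySem.Chars.splitOn cs ['='] with
  | [l, r] => some (l, r)
  | _ => none

-- mapping[word[0]] == 0  (its KeyError/IndexError inputs are excluded by Pre_)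
def leadIsZero (d : PySem.Dict String Int) (w : List Char) : Bool :=
  match w with
  | [] => true
  | c :: _ => PySem.Dict.get? d (pvStr1 c) == some 0

-- mapping[char] (its KeyError is excluded by Pre_: the default is unreachable there)
def dv (d : PySem.Dict String Int) (c : Char) : Int := PySem.Dict.getD d (pvStr1 c) 0

-- hand port of the int() call: exact on every string this port feeds it — concatenations
-- of str(int) outputs, which contain only digits and '-' (no whitespace, '+' or '_');
-- PySem.Int.ofStr? is Python-exact there too, but its parser internals are private to the
-- prelude (no lemmas reach them), so the parser is spelt out here instead.
def pyIntDigits? (cs : List Char) : Option Int :=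
  if cs ≠ [] ∧ cs.all Char.isDigit
  then some (cs.foldl (fun a c => a * 10 + ((c.toNat : Int) - 48)) 0)
  else none

def pyIntJoin? (cs : List Char) : Option Int :=
  if cs.head? = some '-' then (pyIntDigits? cs.tail).map (fun v => -v) else pyIntDigits? cs

-- word_to_number: int("".join(str(mapping[char]) for char in word))
-- (a ValueError of int() means A raises: excluded by Pre_, the .getD 0 is unreachable there)
def wordNumber (d : PySem.Dict String Int) (w : List Char) : Int :=
  (pyIntJoin? ((w.map (fun c => PySem.Int.toChars (dv d c))).flatten)).getD 0

def mapping_satisfies_equation (equation : String) (mapping : List (String × Int)) : Bool :=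
  let d := eqDict mapping
  if !(PySem.Set.equal (PySem.Set.ofList (PySem.Dict.keys d)) (eqLetters equation.toList)) then false
  else if !((PySem.Dict.values d).length == (PySem.Set.ofList (PySem.Dict.values d)).length) then false
  else
    (eqParts equation.toList).elim false (fun lr =>
      let addends := eqAddends lr.1
      let result := PySem.Chars.strip lr.2
      if (addends ++ [result]).any (fun w => leadIsZero d w) then false
      else ((addends.map (fun w => wordNumber d w)).sum == wordNumber d result))

-- ===== PORT B =====
-- column-by-column check: carry + the addends' digits of column i must give the result's
-- digit of column i mod 10; after the last column the carry must be 0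
def colLoop (d : PySem.Dict String Int) (addends : List (List Char)) (result : List Char) :
    Nat → Nat → Int → Bool
  | 0, _, carry => carry == 0
  | fuel+1, i, carry =>
      let total := carry + ((addends.filter (fun w => i ≤ w.length)).map
        (fun w => dv d (PySem.List.pyGetD w (-(i : Int)) ' '))).sum
      let digit := if i ≤ result.length then dv d (PySem.List.pyGetD result (-(i : Int)) ' ') else 0
      if PySem.Int.mod total 10 != digit then false
      else colLoop d addends result fuel (i+1) (PySem.Int.floordiv total 10)

def mapping_satisfies_equation_alt (equation : String) (mapping : List (String × Int)) : Bool :=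
  let d := eqDict mapping
  if !(PySem.Set.equal (PySem.Set.ofList (PySem.Dict.keys d)) (eqLetters equation.toList)) then false
  else if !((PySem.Dict.values d).length == (PySem.Set.ofList (PySem.Dict.values d)).length) then false
  else
    (eqParts equation.toList).elim false (fun lr =>
      let addends := eqAddends lr.1
      let result := PySem.Chars.strip lr.2
      let words := addends ++ [result]
      if words.any (fun w => leadIsZero d w) then false
      else
        let maxLen := (words.map (fun w => w.length)).foldl Nat.max 0
        colLoop d addends result maxLen 1 0)

-- ===== PRECONDITION & SPEC =====
-- Pre_ excludes inputs on which A's conversion step leaves its plain-digit domain: equations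
-- without exactly one '=', an empty result word, word characters missing from the mapping,
-- or mapped values outside 0–9 — there A raises (ValueError/KeyError/IndexError), or exits
-- False just before raising, or int() of the concatenated str(value)s yields accidental values.
def Pre_mapping_satisfies_equation (equation : String) (mapping : List (String × Int)) : Prop :=
  (PySem.Set.equal (PySem.Set.ofList (PySem.Dict.keys (eqDict mapping))) (eqLetters equation.toList) = true ∧
   ((PySem.Dict.values (eqDict mapping)).length == (PySem.Set.ofList (PySem.Dict.values (eqDict mapping))).length) = true) →
  ((PySem.Chars.splitOn equation.toList ['=']).length = 2 ∧
   PySem.Chars.strip ((PySem.Chars.splitOn equation.toList ['=']).getD 1 []) ≠ [] ∧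
   ((eqAddends ((PySem.Chars.splitOn equation.toList ['=']).getD 0 []) ++
        [PySem.Chars.strip ((PySem.Chars.splitOn equation.toList ['=']).getD 1 [])]).all
      (fun w => w.all (fun c => PySem.Dict.contains (eqDict mapping) (pvStr1 c))) = true) ∧
   ((PySem.Dict.items (eqDict mapping)).all
      (fun p => decide (0 ≤ p.2) && decide (p.2 ≤ 9)) = true))

instance (equation : String) (mapping : List (String × Int)) : Decidable (Pre_mapping_satisfies_equation equation mapping) := by
  unfold Pre_mapping_satisfies_equation; infer_instance

def pvWitness_mapping_satisfies_equation : String × (List (String × Int)) :=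
  ("A+B=C", [("A", 1), ("B", 2), ("C", 3)])

def Spec_mapping_satisfies_equation (equation : String) (mapping : List (String × Int)) (out : Bool) : Prop := out = mapping_satisfies_equation_alt equation mapping
instance (equation : String) (mapping : List (String × Int)) (out : Bool) : Decidable (Spec_mapping_satisfies_equation equation mapping out) := by unfold Spec_mapping_satisfies_equation; infer_instance

-- ===== CLAIM (what is proved, stated in full; the proofs are below) =====
def Claim_equal_mapping_satisfies_equation : Prop := ∀ (equation : String) (mapping : List (String × Int)), Dom_mapping_satisfies_equation equation mapping → Pre_mapping_satisfies_equation equation mapping → Spec_mapping_satisfies_equation equation mapping (mapping_satisfies_equation equation mapping)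

-- ===== LEMMAS AND PROOFS =====

-- the decimal value of a char list under the mapping
def pvVal (d : PySem.Dict String Int) (cs : List Char) : Int :=
  cs.foldl (fun a c => a * 10 + dv d c) 0

-- the value contributed by columns ≥ i (1-indexed from the right): the leading len+1-i chars
def pvHi (d : PySem.Dict String Int) (cs : List Char) (i : Nat) : Int :=
  pvVal d (cs.take (cs.length + 1 - i))

-- the digit of column i (0 beyond the word's length)
def pvDig (d : PySem.Dict String Int) (cs : List Char) (i : Nat) : Int :=
  if i ≤ cs.length then dv d (cs.getD (cs.length - i) ' ') else 0

lemma pvVal_append_singleton (d : PySem.Dict String Int) (cs : List Char) (c : Char) :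
    pvVal d (cs ++ [c]) = 10 * pvVal d cs + dv d c := by
  simp [pvVal, List.foldl_append]; ring

lemma pvHi_one (d : PySem.Dict String Int) (cs : List Char) : pvHi d cs 1 = pvVal d cs := by
  simp [pvHi]

lemma pvHi_of_lt (d : PySem.Dict String Int) (cs : List Char) (i : Nat) (h : cs.length < i) :
    pvHi d cs i = 0 := by
  have h0 : cs.length + 1 - i = 0 := by omega
  simp [pvHi, h0, pvVal]

lemma pvHi_succ (d : PySem.Dict String Int) (cs : List Char) (i : Nat) (h1 : 1 ≤ i) :
    pvHi d cs i = 10 * pvHi d cs (i+1) + pvDig d cs i := by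
  by_cases hle : i ≤ cs.length
  · have hlt : cs.length - i < cs.length := by omega
    have h2 : cs.length + 1 - i = (cs.length - i) + 1 := by omega
    have h3 : cs.length + 1 - (i+1) = cs.length - i := by omega
    rw [pvHi, pvHi, h2, h3, List.take_add_one, List.getElem?_eq_getElem hlt]
    rw [Option.toList_some, pvVal_append_singleton]
    rw [pvDig, if_pos hle, List.getD_eq_getElem cs ' ' hlt]
  · rw [pvHi_of_lt d cs i (by omega), pvHi_of_lt d cs (i+1) (by omega),
      pvDig, if_neg hle]
    ring

lemma dv_bounds (mapping : List (String × Int)) (c : Char)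
    (hc : PySem.Dict.contains (eqDict mapping) (pvStr1 c) = true)
    (hv : ∀ p ∈ PySem.Dict.items (eqDict mapping), 0 ≤ p.2 ∧ p.2 ≤ 9) :
    0 ≤ dv (eqDict mapping) c ∧ dv (eqDict mapping) c ≤ 9 := by
  rw [PySem.Dict.contains_eq_isSome_get?] at hc
  obtain ⟨v, hvv⟩ := Option.isSome_iff_exists.mp hc
  have hmem := PySem.Dict.mem_items_of_get?_eq_some (eqDict mapping) hvv
  have := hv _ hmem
  rw [dv, PySem.Dict.getD_of_get?_eq_some (eqDict mapping) 0 hvv]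
  exact this

lemma toChars_digit (n : Int) (h0 : 0 ≤ n) (h9 : n ≤ 9) :
    ∃ c : Char, PySem.Int.toChars n = [c] ∧ c.isDigit = true ∧ c ≠ '-' ∧
      ((c.toNat : Int) - 48) = n := by
  interval_cases n
  · exact ⟨'0', by decide, by decide, by decide, by decide⟩
  · exact ⟨'1', by decide, by decide, by decide, by decide⟩
  · exact ⟨'2', by decide, by decide, by decide, by decide⟩
  · exact ⟨'3', by decide, by decide, by decide, by decide⟩
  · exact ⟨'4', by decide, by decide, by decide, by decide⟩
  · exact ⟨'5', by decide, by decide, by decide, by decide⟩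
  · exact ⟨'6', by decide, by decide, by decide, by decide⟩
  · exact ⟨'7', by decide, by decide, by decide, by decide⟩
  · exact ⟨'8', by decide, by decide, by decide, by decide⟩
  · exact ⟨'9', by decide, by decide, by decide, by decide⟩

lemma joinedDigits (d : PySem.Dict String Int) :
    ∀ (w : List Char), (∀ c ∈ w, 0 ≤ dv d c ∧ dv d c ≤ 9) →
      ((w.map (fun c => PySem.Int.toChars (dv d c))).flatten.all Char.isDigit = true) ∧
      ((w.map (fun c => PySem.Int.toChars (dv d c))).flatten.length = w.length) ∧
      (∀ a : Int, (w.map (fun c => PySem.Int.toChars (dv d c))).flatten.foldl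
          (fun x c => x * 10 + ((c.toNat : Int) - 48)) a
        = w.foldl (fun x c => x * 10 + dv d c) a) := by
  intro w
  induction w with
  | nil => intro _; exact ⟨rfl, rfl, fun a => rfl⟩
  | cons c cs ih =>
      intro hd
      obtain ⟨ch, hch, hdig, hne, hval⟩ :=
        toChars_digit (dv d c) (hd c List.mem_cons_self).1 (hd c List.mem_cons_self).2
      obtain ⟨iha, ihl, ihf⟩ := ih (fun x hx => hd x (List.mem_cons_of_mem c hx))
      refine ⟨?_, ?_, ?_⟩
      · simp [hch, hdig, iha]
      · simp [hch, ihl]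
      · intro a
        simp only [List.map_cons, List.flatten_cons, hch, List.singleton_append,
          List.foldl_cons, hval, ihf]

lemma wordNumber_eq (d : PySem.Dict String Int) (w : List Char) (hw : w ≠ [])
    (hd : ∀ c ∈ w, 0 ≤ dv d c ∧ dv d c ≤ 9) :
    wordNumber d w = pvVal d w := by
  obtain ⟨hall, hlen, hfold⟩ := joinedDigits d w hd
  have hne : (w.map (fun c => PySem.Int.toChars (dv d c))).flatten ≠ [] := by
    intro h
    exact hw (List.eq_nil_of_length_eq_zero (by rw [← hlen, h]; rfl))
  have hhead : (w.map (fun c => PySem.Int.toChars (dv d c))).flatten.head? ≠ some '-' := by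
    intro h
    have hmem : '-' ∈ (w.map (fun c => PySem.Int.toChars (dv d c))).flatten :=
      List.mem_of_mem_head? (by rw [h]; rfl)
    have := List.all_eq_true.mp hall _ hmem
    simp at this
  rw [wordNumber, pyIntJoin?, if_neg hhead, pyIntDigits?, if_pos ⟨hne, hall⟩,
    Option.getD_some, pvVal]
  exact hfold 0

lemma colDigit_eq (d : PySem.Dict String Int) (r : List Char) (i : Nat) (h1 : 1 ≤ i) :
    (if i ≤ r.length then dv d (PySem.List.pyGetD r (-(i : Int)) ' ') else 0) = pvDig d r i := by
  rw [pvDig]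
  by_cases hle : i ≤ r.length
  · rw [if_pos hle, if_pos hle, PySem.List.pyGetD_neg_natCast r i ' ' (by omega) hle,
      List.getD_eq_getElem r ' ' (by omega)]
  · rw [if_neg hle, if_neg hle]

lemma colSum_eq (d : PySem.Dict String Int) (addends : List (List Char)) (i : Nat) (h1 : 1 ≤ i) :
    ((addends.filter (fun w => i ≤ w.length)).map
        (fun w => dv d (PySem.List.pyGetD w (-(i : Int)) ' '))).sum
      = (addends.map (fun w => pvDig d w i)).sum := by
  induction addends with
  | nil => rfl
  | cons w ws ih =>
      by_cases hle : i ≤ w.length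
      · rw [List.filter_cons_of_pos (by simpa using hle), List.map_cons, List.map_cons,
          List.sum_cons, List.sum_cons, ih]
        congr 1
        rw [PySem.List.pyGetD_neg_natCast w i ' ' (by omega) hle,
          pvDig, if_pos hle, List.getD_eq_getElem w ' ' (by omega)]
      · rw [List.filter_cons_of_neg (by simpa using hle), List.map_cons, List.sum_cons, ih,
          pvDig, if_neg hle]
        omega

lemma pvDig_bounds (d : PySem.Dict String Int) (cs : List Char) (i : Nat) (h1 : 1 ≤ i)
    (hd : ∀ c ∈ cs, 0 ≤ dv d c ∧ dv d c ≤ 9) : 0 ≤ pvDig d cs i ∧ pvDig d cs i ≤ 9 := by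
  rw [pvDig]
  split
  · next hle =>
      rw [List.getD_eq_getElem cs ' ' (by omega)]
      exact hd _ (List.getElem_mem _)
  · exact ⟨le_refl 0, by omega⟩

lemma colLoop_iff (d : PySem.Dict String Int) (addends : List (List Char)) (r : List Char)
    (hrd : ∀ c ∈ r, 0 ≤ dv d c ∧ dv d c ≤ 9) :
    ∀ (fuel i : Nat) (carry : Int), 1 ≤ i →
      (∀ w ∈ addends, w.length < i + fuel) → (r.length < i + fuel) →
      (colLoop d addends r fuel i carry = true ↔
        carry + ((addends.map (fun w => pvHi d w i)).sum) = pvHi d r i) := by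
  intro fuel
  induction fuel with
  | zero =>
      intro i carry h1 hlen hrlen
      rw [colLoop]
      have hz : (addends.map (fun w => pvHi d w i)).sum = 0 := by
        apply List.sum_eq_zero
        intro x hx
        obtain ⟨w, hw, rfl⟩ := List.mem_map.mp hx
        exact pvHi_of_lt d w i (by have := hlen w hw; omega)
      rw [hz, pvHi_of_lt d r i (by omega)]
      constructor
      · intro h; have := beq_iff_eq.mp h; omega
      · intro h; exact beq_iff_eq.mpr (by omega)
  | succ fuel ih =>
      intro i carry h1 hlen hrlen
      rw [colLoop]
      have h10 : (0:Int) < 10 := by norm_num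
      have hsum : (addends.map (fun w => pvHi d w i)).sum
          = 10 * (addends.map (fun w => pvHi d w (i+1))).sum
            + (addends.map (fun w => pvDig d w i)).sum := by
        rw [← List.sum_map_mul_left, ← PySem.List.sum_map_add_int]
        exact congrArg List.sum (List.map_congr_left (fun w _ => pvHi_succ d w i h1))
      have hr := pvHi_succ d r i h1
      have hrb := pvDig_bounds d r i h1 hrd
      simp only [colSum_eq d addends i h1, colDigit_eq d r i h1,
        PySem.Int.mod_eq_emod_of_pos h10, PySem.Int.floordiv_eq_ediv_of_pos h10]
      by_cases hm : (carry + (addends.map (fun w => pvDig d w i)).sum) % 10 = pvDig d r i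
      · rw [if_neg (by simp [hm])]
        rw [ih (i+1) _ (by omega) (fun w hw => by have := hlen w hw; omega) (by omega)]
        constructor
        · intro h; omega
        · intro h; omega
      · rw [if_pos (by simp [bne_iff_ne, hm])]
        constructor
        · intro h; cases h
        · intro h; exfalso; apply hm; omega

lemma eqParts_some {cs : List Char} {p : List Char × List Char} (h : eqParts cs = some p) :
    PySem.Chars.splitOn cs ['='] = [p.1, p.2] := by
  unfold eqParts at h
  rcases hs : PySem.Chars.splitOn cs ['='] with _ | ⟨l, _ | ⟨r, _ | ⟨x, rest⟩⟩⟩ <;> rw [hs] at h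
  · cases h
  · cases h
  · obtain rfl := Option.some_inj.mp h
    rfl
  · cases h

-- ===== VERDICT (by name: the statement is the Claim_ definition above) =====
theorem mapping_satisfies_equation_spec : Claim_equal_mapping_satisfies_equation := by
  intro equation mapping hdom hpre
  unfold Spec_mapping_satisfies_equation
  unfold mapping_satisfies_equation mapping_satisfies_equation_alt
  cases hks : PySem.Set.equal (PySem.Set.ofList (PySem.Dict.keys (eqDict mapping))) (eqLetters equation.toList) with
  | false => simp [hks]
  | true =>
  cases huq : ((PySem.Dict.values (eqDict mapping)).length == (PySem.Set.ofList (PySem.Dict.values (eqDict mapping))).length) with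
  | false => simp [hks, huq]
  | true =>
  have hpre' := hpre ⟨hks, huq⟩
  cases hp : eqParts equation.toList with
  | none => simp [hks, huq]
  | some lr =>
  obtain ⟨l, r⟩ := lr
  have hsp : PySem.Chars.splitOn equation.toList ['='] = [l, r] := eqParts_some hp
  rw [hsp] at hpre'
  simp only [List.getD_cons_zero, List.getD_cons_succ] at hpre'
  obtain ⟨-, hres, hcontB, hvalsB⟩ := hpre'
  have hcont : ∀ w ∈ eqAddends l ++ [PySem.Chars.strip r], ∀ c ∈ w,
      PySem.Dict.contains (eqDict mapping) (pvStr1 c) = true := by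
    intro w hw c hc
    exact List.all_eq_true.mp (List.all_eq_true.mp hcontB w hw) c hc
  have hvals : ∀ p ∈ PySem.Dict.items (eqDict mapping), 0 ≤ p.2 ∧ p.2 ≤ 9 := by
    intro p hpm
    have := List.all_eq_true.mp hvalsB p hpm
    rw [Bool.and_eq_true, decide_eq_true_iff, decide_eq_true_iff] at this
    exact this
  simp only [hks, huq, Bool.not_true, Bool.false_eq_true, if_false, Option.elim_some]
  cases hany : ((eqAddends l ++ [PySem.Chars.strip r]).any fun w => leadIsZero (eqDict mapping) w) with
  | true => simp
  | false =>
  simp only [Bool.false_eq_true, if_false]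
  set d := eqDict mapping with hd
  set res := PySem.Chars.strip r with hresdef
  set addends := eqAddends l with haddef
  have hwd : ∀ w ∈ addends ++ [res], ∀ c ∈ w, 0 ≤ dv d c ∧ dv d c ≤ 9 :=
    fun w hw c hc => dv_bounds mapping c (hcont w hw c hc) hvals
  have hresd : ∀ c ∈ res, 0 ≤ dv d c ∧ dv d c ≤ 9 :=
    hwd res (List.mem_append_right _ (List.mem_singleton_self _))
  have hmax := PySem.List.le_foldl_max (((addends ++ [res]).map (fun w => w.length))) 0
  set M := (((addends ++ [res]).map (fun w => w.length)).foldl Nat.max 0) with hM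
  have hlenA : ∀ w ∈ addends, w.length < 1 + M := by
    intro w hw
    have := hmax.2 w.length (List.mem_map_of_mem (List.mem_append_left _ hw))
    omega
  have hlenR : res.length < 1 + M := by
    have := hmax.2 res.length
      (List.mem_map_of_mem (List.mem_append_right _ (List.mem_singleton_self _)))
    omega
  have hIff := colLoop_iff d addends res hresd M 1 0 (le_refl 1) hlenA hlenR
  have hmapeq : addends.map (fun w => wordNumber d w) = addends.map (fun w => pvVal d w) := by
    apply List.map_congr_left
    intro w hw
    have hwne : w ≠ [] := by
      have := (List.mem_filter.mp (haddef ▸ hw)).2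
      simpa using this
    exact wordNumber_eq d w hwne (hwd w (List.mem_append_left _ hw))
  have hhi : addends.map (fun w => pvHi d w 1) = addends.map (fun w => pvVal d w) :=
    List.map_congr_left (fun w _ => pvHi_one d w)
  rw [hmapeq, wordNumber_eq d res hres hresd]
  cases hcl : colLoop d addends res M 1 0 with
  | true =>
      have heq := hIff.mp hcl
      rw [pvHi_one, hhi, zero_add] at heq
      simp [heq]
  | false =>
      apply beq_eq_false_iff_ne.mpr
      intro contra
      rw [hcl] at hIff
      have := hIff.mpr (by rw [pvHi_one, hhi, zero_add]; exact contra)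
      cases this
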